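-- pv_equiv track=rewrite | github.com/mdestefano/advent-of-code-2022 | day5/supply_stack.py | get_state_and_commands
-- ===== SOURCE A (Python) =====
-- def get_state_and_commands(lines):
--     state = []
--     commands = []
--     readin_state = True
--     for line in lines:
--         if readin_state and not line.strip():
--             readin_state = False
--         if line.strip():
--             state.append(line) if readin_state else commands.append(line)
--     return state, commands
-- ===== SOURCE B (Python) =====
-- def get_state_and_commands(lines):
--     lines = list(lines)
--     idx = next((i for i, l in enumerate(lines) if not l.strip()), len(lines))
--     state = [l for l in lines[:idx] if l.strip()]
--     commands = [l for l in lines[idx + 1:] if l.strip()]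
--     return state, commands
-- ===== Notes on version B (the rewrite author's own statement) =====
-- stated objective: simpler
-- what changed: B replaces A's stateful single loop with a flag by locating the index of the first blank line and building state/commands from slices before/after it with filtering comprehensions.
import Mathlib
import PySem

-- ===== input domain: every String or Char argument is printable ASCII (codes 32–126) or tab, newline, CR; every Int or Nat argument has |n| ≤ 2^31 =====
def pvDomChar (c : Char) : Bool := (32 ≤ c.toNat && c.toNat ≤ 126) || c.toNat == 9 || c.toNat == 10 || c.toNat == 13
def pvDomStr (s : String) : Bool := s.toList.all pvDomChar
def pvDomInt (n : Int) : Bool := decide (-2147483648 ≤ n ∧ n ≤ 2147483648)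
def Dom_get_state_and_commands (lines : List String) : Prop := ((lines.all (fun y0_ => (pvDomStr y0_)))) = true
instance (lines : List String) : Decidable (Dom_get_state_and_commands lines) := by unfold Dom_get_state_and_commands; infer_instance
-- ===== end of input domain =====

-- B splits at the index of the first blank line (slices + filtering) instead of A's flag-carrying loop; objective: simpler.

-- ===== PORT A =====
-- blank line test: 'not line.strip()'
def pvBlank (l : String) : Bool := PySem.Str.strip l == ""

def pvGoA : List String → List String → List String → Bool → List String × List String
  | [], st, cm, _ => (st, cm)
  | l :: rest, st, cm, flag =>
    let flag' := if flag && pvBlank l then false else flag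
    if !(pvBlank l) then
      if flag' then pvGoA rest (st ++ [l]) cm flag'
      else pvGoA rest st (cm ++ [l]) flag'
    else pvGoA rest st cm flag'

def get_state_and_commands (lines : List String) : List String × List String :=
  pvGoA lines [] [] true

-- ===== PORT B =====
def get_state_and_commands_alt (lines : List String) : List String × List String :=
  let idx := (lines.findIdx? pvBlank).getD lines.length
  ((lines.take idx).filter (fun l => !(pvBlank l)),
   (lines.drop (idx + 1)).filter (fun l => !(pvBlank l)))

-- ===== PRECONDITION & SPEC =====
def Spec_get_state_and_commands (lines : List String) (out : List String × List String) : Prop := out = get_state_and_commands_alt lines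
instance (lines : List String) (out : List String × List String) : Decidable (Spec_get_state_and_commands lines out) := by unfold Spec_get_state_and_commands; infer_instance

-- ===== CLAIM (what is proved, stated in full; the proofs are below) =====
def Claim_equal_get_state_and_commands : Prop := ∀ (lines : List String), Dom_get_state_and_commands lines → Spec_get_state_and_commands lines (get_state_and_commands lines)

-- ===== LEMMAS AND PROOFS =====
theorem pvGoA_false (lines : List String) : ∀ (st cm : List String),
    pvGoA lines st cm false = (st, cm ++ lines.filter (fun l => !(pvBlank l))) := by
  induction lines with
  | nil => intro st cm; simp [pvGoA]
  | cons l rest ih =>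
    intro st cm
    by_cases h : pvBlank l = true <;> simp [pvGoA, h, ih]

theorem pvGoA_true (lines : List String) : ∀ (st cm : List String),
    pvGoA lines st cm true =
      (st ++ (get_state_and_commands_alt lines).1, cm ++ (get_state_and_commands_alt lines).2) := by
  induction lines with
  | nil => intro st cm; simp [pvGoA, get_state_and_commands_alt]
  | cons l rest ih =>
    intro st cm
    by_cases h : pvBlank l = true
    · simp [pvGoA, h, pvGoA_false, get_state_and_commands_alt, List.findIdx?_cons]
    · have hidx : ((l :: rest).findIdx? pvBlank).getD (rest.length + 1)
          = (rest.findIdx? pvBlank).getD rest.length + 1 := by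
        simp [List.findIdx?_cons, h]
      simp [pvGoA, h, ih, get_state_and_commands_alt, hidx]

-- ===== VERDICT (by name: the statement is the Claim_ definition above) =====
theorem get_state_and_commands_spec : Claim_equal_get_state_and_commands := by
  intro lines _
  unfold Spec_get_state_and_commands get_state_and_commands
  rw [pvGoA_true]
  simp
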